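-- pv_equiv track=rewrite | github.com/anamarigarzon/Proyecto-LPCC | letras_proposicionales.py | lista_val_letras
-- ===== SOURCE A (Python) =====
-- def codifica(d, p, c, g, td, Nd, Np, Nc, Ng, Ntd): #Recibe como argumentos el dia, prisionero, color, guardia, tipo de día, y la respectiva cantidad de cada uno de estos atributos para el problema
--     #codifica el valor de una letra proposicional a partir de sus atributos
--
--     assert((d >= 0) and (d <= Nd - 1)), 'Primer argumento incorrecto! Debe ser un numero entre 0 y ' + str(Nd - 1)  + "\nSe recibio " + str(d)
--     assert((p >= 0) and (p <= Np - 1)), 'Segundo argumento incorrecto! Debe ser un numero entre 0 y ' + str(Np - 1)  + "\nSe recibio " + str(p)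
--     assert((c >= 0) and (c <= Nc - 1)), 'Tercer argumento incorrecto! Debe ser un numero entre 0 y ' + str(Nc - 1)  + "\nSe recibio " + str(c)
--     assert((g >= 0) and (g <= Ng - 1)), 'Cuarto argumento incorrecto! Debe ser un numero entre 0 y ' + str(Ng - 1)  + "\nSe recibio " + str(g)
--     assert((td >= 0) and (td <= Ntd - 1)), 'Quinto argumento incorrecto! Debe ser un numero entre 0 y ' + str(Ntd - 1)  + "\nSe recibio " + str(td)
--
--     #Modificar los valores con el fin de que al operarlos con la ecuación de abajo produzcan un entero único
--
--     p = p+12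
--     c = c+17
--     g = g+19
--     td = td+21
--
--     n = td*p*c*g + d #Entero único para este problema
--
--     return n #retorna variable que contiene al entero único
--
-- def lista_val_letras(Nd,Np,Nc,Ng,Ntd): #Recibe como argumentos la cantidad de días, prisioneros, colores, guardias y tipos de días
--     #genera una lista con cada uno de los valores de las letras proposicionales
--
--     mylist = [] # lista vacía
--
--     for d in range(Nd):
--         for p in range(Np):
--             for c in range(Nc):
--                 for g in range(Ng):
--                     for t in range(Ntd):
--                         v1 = codifica(d, p, c, g, t, Nd, Np, Nc, Ng, Ntd)
--                         mylist.append(v1) #Se guarda cada uno de los valores de las letras proposicionales en mylist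
--
--     return mylist #Retorna lista con todos los valores de cada una las letras proposicionales
-- ===== SOURCE B (Python) =====
-- def lista_val_letras(Nd, Np, Nc, Ng, Ntd):
--     # Empty grid: no proposition letters at all.
--     if Nd <= 0 or Np <= 0 or Nc <= 0 or Ng <= 0 or Ntd <= 0:
--         return []
--     # Two-phase: precompute the multiplicative inner table once, then add each day offset.
--     base = [(t + 21) * (p + 12) * (c + 17) * (g + 19)
--             for p in range(Np)
--             for c in range(Nc)
--             for g in range(Ng)
--             for t in range(Ntd)]
--     return [b + d for d in range(Nd) for b in base]
-- ===== Notes on version B (the rewrite author's own statement) =====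
-- stated objective: faster
-- what changed: B returns [] immediately for an empty grid and otherwise precomputes the Np*Nc*Ng*Ntd multiplicative base table once, producing the output as base-plus-d offsets per day, instead of recomputing the product (and re-checking five asserts) for every (d,p,c,g,t) tuple.
import Mathlib
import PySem

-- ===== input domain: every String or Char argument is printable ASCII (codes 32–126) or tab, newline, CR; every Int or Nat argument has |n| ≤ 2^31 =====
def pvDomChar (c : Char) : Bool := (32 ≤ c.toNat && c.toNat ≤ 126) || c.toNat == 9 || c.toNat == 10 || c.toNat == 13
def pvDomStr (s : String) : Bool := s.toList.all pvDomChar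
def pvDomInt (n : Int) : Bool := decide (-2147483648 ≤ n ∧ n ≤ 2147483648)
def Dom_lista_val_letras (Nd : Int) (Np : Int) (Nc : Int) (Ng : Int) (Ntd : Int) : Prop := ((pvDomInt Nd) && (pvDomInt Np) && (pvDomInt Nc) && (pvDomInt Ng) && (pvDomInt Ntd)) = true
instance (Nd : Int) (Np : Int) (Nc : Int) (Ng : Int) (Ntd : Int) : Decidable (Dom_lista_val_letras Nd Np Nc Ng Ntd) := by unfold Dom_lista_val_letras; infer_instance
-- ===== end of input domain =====

-- B precomputes the multiplicative base table once and adds the day offset afterwards (objective: faster by avoiding per-element reassembly; equivalence proved below).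

-- ===== PORT A =====
-- codifica's five asserts always hold at lista_val_letras's call sites (each loop index is in range),
-- so the port computes the value directly.
def codifica (d : Int) (p : Int) (c : Int) (g : Int) (td : Int)
    (_Nd : Int) (_Np : Int) (_Nc : Int) (_Ng : Int) (_Ntd : Int) : Int :=
  let p := p + 12
  let c := c + 17
  let g := g + 19
  let td := td + 21
  td * p * c * g + d

def lista_val_letras (Nd : Int) (Np : Int) (Nc : Int) (Ng : Int) (Ntd : Int) : List Int :=
  (PySem.List.pyRange 0 Nd 1).foldl (fun mylist d =>
    (PySem.List.pyRange 0 Np 1).foldl (fun mylist p =>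
      (PySem.List.pyRange 0 Nc 1).foldl (fun mylist c =>
        (PySem.List.pyRange 0 Ng 1).foldl (fun mylist g =>
          (PySem.List.pyRange 0 Ntd 1).foldl (fun mylist t =>
            mylist ++ [codifica d p c g t Nd Np Nc Ng Ntd]) mylist) mylist) mylist) mylist) []

-- ===== PORT B =====
def pvBaseTable (Np : Int) (Nc : Int) (Ng : Int) (Ntd : Int) : List Int :=
  (PySem.List.pyRange 0 Np 1).flatMap (fun p =>
    (PySem.List.pyRange 0 Nc 1).flatMap (fun c =>
      (PySem.List.pyRange 0 Ng 1).flatMap (fun g =>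
        (PySem.List.pyRange 0 Ntd 1).map (fun t =>
          (t + 21) * (p + 12) * (c + 17) * (g + 19)))))

def lista_val_letras_alt (Nd : Int) (Np : Int) (Nc : Int) (Ng : Int) (Ntd : Int) : List Int :=
  if Nd ≤ 0 ∨ Np ≤ 0 ∨ Nc ≤ 0 ∨ Ng ≤ 0 ∨ Ntd ≤ 0 then []
  else
    let base := pvBaseTable Np Nc Ng Ntd
    (PySem.List.pyRange 0 Nd 1).flatMap (fun d => base.map (fun b => b + d))

-- ===== PRECONDITION & SPEC =====
def Spec_lista_val_letras (Nd : Int) (Np : Int) (Nc : Int) (Ng : Int) (Ntd : Int) (out : List Int) : Prop := out = lista_val_letras_alt Nd Np Nc Ng Ntd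
instance (Nd : Int) (Np : Int) (Nc : Int) (Ng : Int) (Ntd : Int) (out : List Int) : Decidable (Spec_lista_val_letras Nd Np Nc Ng Ntd out) := by unfold Spec_lista_val_letras; infer_instance

-- ===== CLAIM (what is proved, stated in full; the proofs are below) =====
def Claim_equal_lista_val_letras : Prop := ∀ (Nd : Int) (Np : Int) (Nc : Int) (Ng : Int) (Ntd : Int), Dom_lista_val_letras Nd Np Nc Ng Ntd → Spec_lista_val_letras Nd Np Nc Ng Ntd (lista_val_letras Nd Np Nc Ng Ntd)

-- ===== LEMMAS AND PROOFS =====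

-- ===== VERDICT (by name: the statement is the Claim_ definition above) =====
-- A, rewritten from its append-accumulator loops to nested flatMaps.
theorem lista_val_letras_norm (Nd Np Nc Ng Ntd : Int) :
    lista_val_letras Nd Np Nc Ng Ntd =
      (PySem.List.pyRange 0 Nd 1).flatMap (fun d =>
        (PySem.List.pyRange 0 Np 1).flatMap (fun p =>
          (PySem.List.pyRange 0 Nc 1).flatMap (fun c =>
            (PySem.List.pyRange 0 Ng 1).flatMap (fun g =>
              (PySem.List.pyRange 0 Ntd 1).map (fun t =>
                (t + 21) * (p + 12) * (c + 17) * (g + 19) + d))))) := by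
  simp only [lista_val_letras, codifica,
    PySem.List.foldl_append_singleton_eq_map, PySem.List.foldl_append_eq_flatMap,
    List.nil_append]

theorem lista_val_letras_spec : Claim_equal_lista_val_letras := by
  intro Nd Np Nc Ng Ntd _
  unfold Spec_lista_val_letras lista_val_letras_alt
  rw [lista_val_letras_norm]
  by_cases h : Nd ≤ 0 ∨ Np ≤ 0 ∨ Nc ≤ 0 ∨ Ng ≤ 0 ∨ Ntd ≤ 0
  · rw [if_pos h]
    rcases h with h | h | h | h | h <;>
      simp [PySem.List.pyRange_one_eq_nil h]
  · rw [if_neg h]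
    congr 1
    funext d
    simp only [pvBaseTable, List.map_flatMap, List.map_map, Function.comp_def]
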